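-- pv_equiv track=rewrite | github.com/project-sunbird/sunbird-ml-workbench | src/main/python/daggit/core/oplib/nlp.py | word_to_phrase_match
-- ===== SOURCE A (Python) =====
-- def word_to_phrase_match(wordlist, phraselist, DELIMITTER):#WordtoPhraseMatch
--     phrasewords = [item.split(DELIMITTER) for item in phraselist]
--     match_count = 0
--     partial_match_list = []
--     wordlist_dynamic = wordlist[:]
--     for items in phrasewords:
--         word_count = 0
--         wordlist = wordlist_dynamic[:]
--         for word in wordlist:
--             if word in items:
--                 word_count += 1
--                 partial_match_list.append((word, DELIMITTER.join(items)))
--                 wordlist_dynamic.remove(word)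
--         match_count += int(bool(word_count))
--     return partial_match_list, match_count
-- ===== SOURCE B (Python) =====
-- def word_to_phrase_match(wordlist, phraselist, DELIMITTER):
--     # Ownership index: each word value belongs to the first phrase whose word
--     # list contains it; then one grouped emission pass per phrase.
--     phrasewords = [p.split(DELIMITTER) for p in phraselist]
--     owner = {}
--     for i, items in enumerate(phrasewords):
--         for w in items:
--             if w not in owner:
--                 owner[w] = i
--     partial_match_list = []
--     match_count = 0
--     for i, items in enumerate(phrasewords):
--         matched = [(w, DELIMITTER.join(items)) for w in wordlist if owner.get(w) == i]
--         partial_match_list += matched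
--         if matched:
--             match_count += 1
--     return partial_match_list, match_count
-- ===== Notes on version B (the rewrite author's own statement) =====
-- stated objective: alternative
-- what changed: Replaces A's per-phrase snapshot-and-remove mutation loop (copying and destructively shrinking the word list while iterating) with a dict built once mapping each word value to the index of the first phrase containing it, followed by one grouped emission pass per phrase over the unmodified wordlist.
import Mathlib
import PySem

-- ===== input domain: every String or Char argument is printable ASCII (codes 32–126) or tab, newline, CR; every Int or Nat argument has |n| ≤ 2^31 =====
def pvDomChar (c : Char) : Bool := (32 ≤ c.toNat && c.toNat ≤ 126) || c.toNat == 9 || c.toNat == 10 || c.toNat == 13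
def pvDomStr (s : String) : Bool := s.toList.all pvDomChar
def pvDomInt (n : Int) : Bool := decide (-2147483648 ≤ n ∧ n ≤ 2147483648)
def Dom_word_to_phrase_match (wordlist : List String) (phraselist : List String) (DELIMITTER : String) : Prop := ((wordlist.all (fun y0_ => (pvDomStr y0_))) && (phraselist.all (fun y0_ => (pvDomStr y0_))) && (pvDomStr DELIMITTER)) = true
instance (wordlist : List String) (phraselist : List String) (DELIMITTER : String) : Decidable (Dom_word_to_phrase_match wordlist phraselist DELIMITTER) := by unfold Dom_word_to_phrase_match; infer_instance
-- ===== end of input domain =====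

-- B replaces A's stateful snapshot-and-remove loop by a word→first-owning-phrase
-- index built once, then one grouped emission pass per phrase (objective: alternative).
-- Neither version mutates its arguments as seen by the caller.

-- ===== PORT A =====
-- inner loop body: 'if word in items: word_count += 1; append; wordlist_dynamic.remove(word)'
def pvAInnerStep (items : List String) (DELIMITTER : String)
    (st : Int × List (String × String) × List String) (word : String) :
    Int × List (String × String) × List String :=
  if word ∈ items then
    (st.1 + 1, st.2.1 ++ [(word, PySem.Str.join DELIMITTER items)],
     -- list.remove: on every state this loop reaches the word is still present,
     -- so Python's remove succeeds; 'getD' only totalizes the never-hit none case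
     (PySem.List.remove? st.2.2 word).getD st.2.2)
  else st

-- outer loop body over one 'items': snapshot wordlist, inner loop, match_count += int(bool(word_count))
def pvAOuterStep (DELIMITTER : String)
    (st : Int × List (String × String) × List String) (items : List String) :
    Int × List (String × String) × List String :=
  let inner := st.2.2.foldl (pvAInnerStep items DELIMITTER) (0, st.2.1, st.2.2)
  (st.1 + (if inner.1 = 0 then 0 else 1), inner.2.1, inner.2.2)

def word_to_phrase_match (wordlist : List String) (phraselist : List String) (DELIMITTER : String) : (List (String × String)) × Int :=
  -- item.split(DELIMITTER): raises on DELIMITTER = "" (excluded by Pre_); getD is never hit inside Pre_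
  let phrasewords := phraselist.map (fun item => (PySem.Str.split? item DELIMITTER).getD [])
  let st := phrasewords.foldl (pvAOuterStep DELIMITTER) (0, [], wordlist)
  (st.2.1, st.1)

-- ===== PORT B =====
-- 'if w not in owner: owner[w] = i'
def pvBOwnStep (i : Int) (d : PySem.Dict String Int) (w : String) : PySem.Dict String Int :=
  if d.contains w then d else d.insert w i

-- second pass body: matched = [(w, DELIMITTER.join(items)) for w in wordlist if owner.get(w) == i]
def pvBEmitStep (wordlist : List String) (owner : PySem.Dict String Int) (DELIMITTER : String)
    (st : List (String × String) × Int) (pi : Int × List String) :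
    List (String × String) × Int :=
  let matched := (wordlist.filter (fun w => owner.get? w == some pi.1)).map
      (fun w => (w, PySem.Str.join DELIMITTER pi.2))
  (st.1 ++ matched, st.2 + (if matched.isEmpty then 0 else 1))

def word_to_phrase_match_alt (wordlist : List String) (phraselist : List String) (DELIMITTER : String) : (List (String × String)) × Int :=
  let phrasewords := phraselist.map (fun p => (PySem.Str.split? p DELIMITTER).getD [])
  let owner := (PySem.List.enumerate phrasewords 0).foldl
      (fun d pi => pi.2.foldl (pvBOwnStep pi.1) d) PySem.Dict.empty
  (PySem.List.enumerate phrasewords 0).foldl (pvBEmitStep wordlist owner DELIMITTER) ([], 0)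

-- ===== PRECONDITION & SPEC =====
-- Pre_ excludes only inputs where Python A raises: str.split("") is a ValueError
-- (empty separator), hit as soon as phraselist is non-empty.
def Pre_word_to_phrase_match (wordlist : List String) (phraselist : List String) (DELIMITTER : String) : Prop :=
  DELIMITTER ≠ "" ∨ phraselist = []
instance (wordlist : List String) (phraselist : List String) (DELIMITTER : String) : Decidable (Pre_word_to_phrase_match wordlist phraselist DELIMITTER) := by unfold Pre_word_to_phrase_match; infer_instance

def pvWitness_word_to_phrase_match : List String × List String × String := (["big", "data"], ["big data", "small data"], " ")

def Spec_word_to_phrase_match (wordlist : List String) (phraselist : List String) (DELIMITTER : String) (out : (List (String × String)) × Int) : Prop := out = word_to_phrase_match_alt wordlist phraselist DELIMITTER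
instance (wordlist : List String) (phraselist : List String) (DELIMITTER : String) (out : (List (String × String)) × Int) : Decidable (Spec_word_to_phrase_match wordlist phraselist DELIMITTER out) := by unfold Spec_word_to_phrase_match; infer_instance

-- ===== CLAIM (what is proved, stated in full; the proofs are below) =====
def Claim_equal_word_to_phrase_match : Prop := ∀ (wordlist : List String) (phraselist : List String) (DELIMITTER : String), Dom_word_to_phrase_match wordlist phraselist DELIMITTER → Pre_word_to_phrase_match wordlist phraselist DELIMITTER → Spec_word_to_phrase_match wordlist phraselist DELIMITTER (word_to_phrase_match wordlist phraselist DELIMITTER)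

-- ===== LEMMAS AND PROOFS =====

-- first-match option: some a if some, else b
def pvOr (a b : Option Int) : Option Int :=
  match a with
  | some v => some v
  | none => b

-- index (from s) of the first member of pws containing w
def pvEnumFind (w : String) : List (List String) → Int → Option Int
  | [], _ => none
  | its :: rest, s => if w ∈ its then some s else pvEnumFind w rest (s + 1)

-- shared canonical run: per phrase, (emitted pairs, match flag sum, leftover words)
def pvSpecRun (DELIMITTER : String) : List String → List (List String) → List (String × String) × Int × List String
  | wl, [] => ([], 0, wl)
  | wl, its :: rest =>
    let m := wl.filter (fun w => decide (w ∈ its))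
    let r := pvSpecRun DELIMITTER (wl.filter (fun w => decide (w ∉ its))) rest
    (m.map (fun w => (w, PySem.Str.join DELIMITTER its)) ++ r.1,
     (if m.isEmpty then (0 : Int) else 1) + r.2.1, r.2.2)

theorem pvOr_assoc (a b c : Option Int) : pvOr (pvOr a b) c = pvOr a (pvOr b c) := by
  cases a <;> rfl

theorem pvAInner_run (items : List String) (DELIMITTER : String) :
    ∀ (s Q : List String) (wc : Int) (pml : List (String × String)),
      (∀ x ∈ Q, x ∉ items) →
      s.foldl (pvAInnerStep items DELIMITTER) (wc, pml, Q ++ s) =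
        (wc + ((s.filter (fun w => decide (w ∈ items))).length : Int),
         pml ++ (s.filter (fun w => decide (w ∈ items))).map (fun w => (w, PySem.Str.join DELIMITTER items)),
         Q ++ s.filter (fun w => decide (w ∉ items))) := by
  intro s
  induction s with
  | nil => intro Q wc pml hQ; simp
  | cons w t ih =>
    intro Q wc pml hQ
    simp only [List.foldl_cons]
    by_cases hm : w ∈ items
    · have hwQ : w ∉ Q := fun h => hQ w h hm
      have hrem : (PySem.List.remove? (Q ++ w :: t) w).getD (Q ++ w :: t) = Q ++ t := by
        rw [PySem.List.remove?_eq_some_erase (Q ++ w :: t) w (by simp),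
            List.erase_append_right _ hwQ, List.erase_cons_head]
        rfl
      have hstep : pvAInnerStep items DELIMITTER (wc, pml, Q ++ w :: t) w =
          (wc + 1, pml ++ [(w, PySem.Str.join DELIMITTER items)], Q ++ t) := by
        simp only [pvAInnerStep, if_pos hm]
        exact congrArg _ (congrArg _ hrem)
      rw [hstep, ih Q (wc + 1) _ hQ]
      simp only [List.filter_cons, decide_eq_true_eq, if_pos hm,
        List.length_cons, List.map_cons, Prod.mk.injEq]
      refine ⟨by push_cast; ring, by simp, by simp [hm]⟩
    · have hstep : pvAInnerStep items DELIMITTER (wc, pml, Q ++ w :: t) w =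
          (wc, pml, (Q ++ [w]) ++ t) := by
        simp [pvAInnerStep, if_neg hm]
      have hQ' : ∀ x ∈ Q ++ [w], x ∉ items := by
        intro x hx
        rcases List.mem_append.1 hx with h | h
        · exact hQ x h
        · simp at h; subst h; exact hm
      rw [hstep, ih (Q ++ [w]) wc pml hQ']
      simp [hm, List.append_assoc]

theorem pvA_run (DELIMITTER : String) :
    ∀ (pws : List (List String)) (mc : Int) (pml : List (String × String)) (dyn : List String),
      pws.foldl (pvAOuterStep DELIMITTER) (mc, pml, dyn) =
        (mc + (pvSpecRun DELIMITTER dyn pws).2.1,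
         pml ++ (pvSpecRun DELIMITTER dyn pws).1,
         (pvSpecRun DELIMITTER dyn pws).2.2) := by
  intro pws
  induction pws with
  | nil => intro mc pml dyn; simp [pvSpecRun]
  | cons its rest ih =>
    intro mc pml dyn
    rw [List.foldl_cons]
    have hinner := pvAInner_run its DELIMITTER dyn [] 0 pml (by simp)
    simp only [List.nil_append] at hinner
    have hstep : pvAOuterStep DELIMITTER (mc, pml, dyn) its =
        (mc + (if (dyn.filter (fun w => decide (w ∈ its))).isEmpty then 0 else 1),
         pml ++ (dyn.filter (fun w => decide (w ∈ its))).map (fun w => (w, PySem.Str.join DELIMITTER its)),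
         dyn.filter (fun w => decide (w ∉ its))) := by
      simp only [pvAOuterStep, hinner]
      have : ((0 : Int) + ((dyn.filter (fun w => decide (w ∈ its))).length : Int) = 0) ↔
          (dyn.filter (fun w => decide (w ∈ its))).isEmpty := by
        rw [List.isEmpty_iff_length_eq_zero]
        omega
      have h2 : (if ((0 : Int) + ((dyn.filter (fun w => decide (w ∈ its))).length : Int)) = 0 then (0 : Int) else 1) =
          (if (dyn.filter (fun w => decide (w ∈ its))).isEmpty then (0 : Int) else 1) := by
        by_cases he : (dyn.filter (fun w => decide (w ∈ its))).isEmpty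
        · rw [if_pos he, if_pos (this.mpr he)]
        · rw [if_neg (fun hc => he (this.mp hc)), if_neg he]
      rw [h2]
    rw [hstep, ih]
    simp [pvSpecRun, List.append_assoc]
    ring

theorem pvBOwn_inner (its : List String) (i : Int) :
    ∀ (d : PySem.Dict String Int) (w : String),
      (its.foldl (pvBOwnStep i) d).get? w =
        pvOr (d.get? w) (if w ∈ its then some i else none) := by
  induction its with
  | nil => intro d w; cases h : d.get? w <;> simp [pvOr, h]
  | cons x rest ih =>
    intro d w
    simp only [List.foldl_cons, pvBOwnStep]
    by_cases hc : d.contains x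
    · rw [if_pos hc, ih d w]
      by_cases hwx : w = x
      · subst hwx
        have : (d.get? w).isSome := by rw [← PySem.Dict.contains_eq_isSome_get?]; exact hc
        cases h : d.get? w with
        | none => rw [h] at this; simp at this
        | some v => simp [pvOr]
      · simp [List.mem_cons, hwx]
    · rw [if_neg (by simp [hc]), ih (d.insert x i) w]
      by_cases hwx : w = x
      · subst hwx
        rw [PySem.Dict.get?_insert_self]
        have hn : d.get? w = none := by
          cases h : d.get? w with
          | none => rfl
          | some v =>
            have := PySem.Dict.contains_eq_isSome_get? (d := d) (k := w)
            rw [h] at this; simp [this] at hc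
        simp [pvOr, hn, List.mem_cons]
      · rw [PySem.Dict.get?_insert_of_ne (hne := hwx)]
        simp [List.mem_cons, hwx]

theorem pvBOwn_run :
    ∀ (pws : List (List String)) (s : Int) (d : PySem.Dict String Int) (w : String),
      ((PySem.List.enumerate pws s).foldl (fun d pi => pi.2.foldl (pvBOwnStep pi.1) d) d).get? w =
        pvOr (d.get? w) (pvEnumFind w pws s) := by
  intro pws
  induction pws with
  | nil =>
    intro s d w
    cases h : d.get? w <;> simp [PySem.List.enumerate_nil, pvEnumFind, pvOr, h]
  | cons its rest ih =>
    intro s d w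
    rw [PySem.List.enumerate_cons, List.foldl_cons]
    rw [ih (s + 1) (its.foldl (pvBOwnStep s) d) w, pvBOwn_inner its s d w, pvOr_assoc]
    congr 1
    by_cases hm : w ∈ its <;> simp [pvEnumFind, hm, pvOr]

theorem pvEnumFind_bounds (w : String) :
    ∀ (pws : List (List String)) (s j : Int), pvEnumFind w pws s = some j → s ≤ j ∧ j < s + pws.length := by
  intro pws
  induction pws with
  | nil => intro s j h; simp [pvEnumFind] at h
  | cons its rest ih =>
    intro s j h
    simp only [pvEnumFind] at h
    by_cases hm : w ∈ its
    · simp [hm] at h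
      subst h
      simp only [List.length_cons]
      push_cast
      omega
    · simp [hm] at h
      have := ih (s + 1) j h
      simp only [List.length_cons]
      push_cast
      omega

theorem pvEnumFind_append (w : String) :
    ∀ (pre pws : List (List String)) (s : Int),
      pvEnumFind w (pre ++ pws) s = pvOr (pvEnumFind w pre s) (pvEnumFind w pws (s + pre.length)) := by
  intro pre
  induction pre with
  | nil => intro pws s; simp [pvEnumFind, pvOr]
  | cons its rest ih =>
    intro pws s
    by_cases hm : w ∈ its
    · simp [pvEnumFind, hm, pvOr]
    · simp only [List.cons_append, pvEnumFind, if_neg hm, ih pws (s + 1), List.length_cons]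
      have : s + 1 + ((rest.length : Int)) = s + (((rest.length : Nat) + 1 : Nat) : Int) := by
        push_cast; ring
      rw [this]

theorem pvB_run (DELIMITTER : String) (wl0 : List String) (owner : PySem.Dict String Int) :
    ∀ (pws pre : List (List String)) (pml : List (String × String)) (mc : Int),
      (∀ w, owner.get? w = pvOr (pvEnumFind w pre 0) (pvEnumFind w pws (pre.length : Int))) →
      (PySem.List.enumerate pws ((pre.length : Int))).foldl (pvBEmitStep wl0 owner DELIMITTER) (pml, mc) =
        (pml ++ (pvSpecRun DELIMITTER (wl0.filter (fun w => decide (pvEnumFind w pre 0 = none))) pws).1,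
         mc + (pvSpecRun DELIMITTER (wl0.filter (fun w => decide (pvEnumFind w pre 0 = none))) pws).2.1) := by
  intro pws
  induction pws with
  | nil => intro pre pml mc Hown; simp [PySem.List.enumerate_nil, pvSpecRun]
  | cons its rest ih =>
    intro pre pml mc Hown
    rw [PySem.List.enumerate_cons, List.foldl_cons]
    have hfilt : wl0.filter (fun w => owner.get? w == some (pre.length : Int)) =
        (wl0.filter (fun w => decide (pvEnumFind w pre 0 = none))).filter (fun w => decide (w ∈ its)) := by
      rw [List.filter_filter]
      apply List.filter_congr
      intro a _
      rw [Hown a]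
      cases hp : pvEnumFind a pre 0 with
      | some j =>
        have hb := (pvEnumFind_bounds a pre 0 j hp).2
        simp [pvOr, Bool.beq_eq_decide_eq, decide_eq_false_iff_not]
        omega
      | none =>
        by_cases hm : a ∈ its
        · simp [pvOr, pvEnumFind, hm]
        · simp only [pvOr, pvEnumFind, if_neg hm]
          cases hv : pvEnumFind a rest ((pre.length : Int) + 1) with
          | some j =>
            have hb := (pvEnumFind_bounds a rest _ j hv).1
            simp [hm, Bool.beq_eq_decide_eq, decide_eq_false_iff_not]
            omega
          | none => simp [hm]
    have hstep : pvBEmitStep wl0 owner DELIMITTER (pml, mc) ((pre.length : Int), its) =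
        (pml ++ (((wl0.filter (fun w => decide (pvEnumFind w pre 0 = none))).filter (fun w => decide (w ∈ its))).map
            (fun w => (w, PySem.Str.join DELIMITTER its))),
         mc + (if ((wl0.filter (fun w => decide (pvEnumFind w pre 0 = none))).filter (fun w => decide (w ∈ its))).isEmpty
            then 0 else 1)) := by
      simp only [pvBEmitStep, hfilt, List.isEmpty_map]
    have Hown' : ∀ w, owner.get? w =
        pvOr (pvEnumFind w (pre ++ [its]) 0) (pvEnumFind w rest (((pre ++ [its]).length : Int))) := by
      intro w
      rw [pvEnumFind_append w pre [its] 0, pvOr_assoc, Hown w]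
      congr 1
      have hlen : ((pre ++ [its]).length : Int) = (pre.length : Int) + 1 := by
        simp
      rw [hlen]
      by_cases hm : w ∈ its <;> simp [pvEnumFind, pvOr, hm]
    have hlen2 : (pre.length : Int) + 1 = (((pre ++ [its]).length : Int)) := by simp
    rw [hstep, hlen2, ih (pre ++ [its]) _ _ Hown']
    have hfilt2 : wl0.filter (fun w => decide (pvEnumFind w (pre ++ [its]) 0 = none)) =
        (wl0.filter (fun w => decide (pvEnumFind w pre 0 = none))).filter (fun w => decide (w ∉ its)) := by
      rw [List.filter_filter]
      apply List.filter_congr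
      intro a _
      rw [pvEnumFind_append a pre [its] 0]
      cases hp : pvEnumFind a pre 0 with
      | some j => simp [pvOr]
      | none => by_cases hm : a ∈ its <;> simp [pvOr, pvEnumFind, hm]
    rw [hfilt2]
    simp [pvSpecRun, List.append_assoc]
    ring

-- ===== VERDICT (by name: the statement is the Claim_ definition above) =====
theorem word_to_phrase_match_spec : Claim_equal_word_to_phrase_match := by
  intro wordlist phraselist DELIMITTER _ _
  unfold Spec_word_to_phrase_match
  simp only [word_to_phrase_match, word_to_phrase_match_alt]
  have hown : ∀ w,
      ((PySem.List.enumerate (phraselist.map (fun p => (PySem.Str.split? p DELIMITTER).getD [])) 0).foldl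
        (fun d pi => pi.2.foldl (pvBOwnStep pi.1) d) PySem.Dict.empty).get? w =
      pvOr (pvEnumFind w ([] : List (List String)) 0)
        (pvEnumFind w (phraselist.map (fun p => (PySem.Str.split? p DELIMITTER).getD []))
          ((([] : List (List String)).length : Int))) := by
    intro w
    rw [pvBOwn_run _ 0 PySem.Dict.empty w]
    simp [PySem.Dict.get?_empty, pvOr, pvEnumFind]
  have hB := pvB_run DELIMITTER wordlist _ _ [] [] 0 hown
  simp only [List.length_nil, Nat.cast_zero] at hB
  rw [pvA_run, hB]
  simp [pvEnumFind]
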